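-- pv_equiv track=rewrite | github.com/darkismus/mooc-ohjelmointi-21 | osa04-19_listan_pisimmat/src/listan_pisimmat.py | pisimmat
-- ===== SOURCE A (Python) =====
-- def pisimmat(lista : list):
--     pisin = 0
--     vastaus_lista = []
--     for i in lista:
--         if pisin < len(i):
--             vastaus_lista = []
--             vastaus_lista.append(i)
--             pisin = len(i)
--         elif pisin == len(i):
--             vastaus_lista.append(i)
--     return vastaus_lista
-- ===== SOURCE B (Python) =====
-- def pisimmat(lista: list):
--     m = max((len(x) for x in lista), default=0)
--     return [x for x in lista if len(x) == m]
-- ===== Notes on version B (the rewrite author's own statement) =====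
-- stated objective: simpler
-- what changed: Replaced A's single running-best scan that resets and rebuilds the answer list on each new maximum with a two-pass formulation: compute the maximum length once (max with default 0), then filter the list for items of that length.
import Mathlib
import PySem

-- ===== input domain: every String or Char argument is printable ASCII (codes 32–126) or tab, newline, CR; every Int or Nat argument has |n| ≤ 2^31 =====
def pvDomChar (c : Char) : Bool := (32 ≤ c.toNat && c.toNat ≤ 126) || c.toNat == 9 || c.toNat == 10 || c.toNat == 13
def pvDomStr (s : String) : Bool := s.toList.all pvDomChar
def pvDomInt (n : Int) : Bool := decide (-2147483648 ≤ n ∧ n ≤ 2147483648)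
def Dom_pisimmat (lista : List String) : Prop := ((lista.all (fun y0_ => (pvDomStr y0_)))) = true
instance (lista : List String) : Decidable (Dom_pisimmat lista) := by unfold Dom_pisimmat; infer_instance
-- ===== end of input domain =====

-- B computes the maximum length once and then filters, instead of A's running-best scan
-- that rebuilds the answer list on every new maximum (objective: simpler).

-- ===== PORT A =====
-- the loop body of A: state = (pisin, vastaus_lista)
def pisimmatStep (st : Int × List String) (i : String) : Int × List String :=
  if st.1 < PySem.Str.len i then (PySem.Str.len i, [i])
  else if st.1 = PySem.Str.len i then (st.1, st.2 ++ [i])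
  else st

def pisimmat (lista : List String) : List String :=
  (lista.foldl pisimmatStep (0, [])).2

-- ===== PORT B =====
def pisimmat_alt (lista : List String) : List String :=
  let m : Int := (PySem.List.max? (lista.map (fun x => PySem.Str.len x)) (fun y => y)).getD 0
  lista.filter (fun x => PySem.Str.len x == m)

-- ===== PRECONDITION & SPEC =====
def Spec_pisimmat (lista : List String) (out : List String) : Prop := out = pisimmat_alt lista
instance (lista : List String) (out : List String) : Decidable (Spec_pisimmat lista out) := by unfold Spec_pisimmat; infer_instance

-- ===== CLAIM (what is proved, stated in full; the proofs are below) =====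
def Claim_equal_pisimmat : Prop := ∀ (lista : List String), Dom_pisimmat lista → Spec_pisimmat lista (pisimmat lista)

-- ===== LEMMAS AND PROOFS =====

-- running maximum of lengths starting from p
def pvMx (l : List String) (p : Int) : Int :=
  l.foldl (fun m x => max m (PySem.Str.len x)) p

theorem pvLe_mx (l : List String) (p : Int) : p ≤ pvMx l p :=
  (PySem.List.le_foldl_max_int l (fun x => PySem.Str.len x) p).1

-- loop invariant for A's scan: the final state is (running max, filter of the max-length items)
theorem pisimmat_loop (l : List String) : ∀ (p : Int) (acc : List String),
    l.foldl pisimmatStep (p, acc)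
      = (pvMx l p,
         (if pvMx l p = p then acc else []) ++ l.filter (fun x => PySem.Str.len x == pvMx l p)) := by
  induction l with
  | nil => intro p acc; simp [pvMx]
  | cons x t ih =>
    intro p acc
    have hL : PySem.Str.len x = (x.length : Int) := by simp
    rcases lt_trichotomy p ((x.length : Int)) with h | h | h
    · have hm : max p ((x.length : Int)) = (x.length : Int) := by omega
      have hxt : pvMx (x :: t) p = pvMx t ((x.length : Int)) := by
        simp only [pvMx, List.foldl_cons, hL]; rw [hm]
      have hle : (x.length : Int) ≤ pvMx t ((x.length : Int)) := by
        have := pvLe_mx t ((x.length : Int)); omega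
      have step : pisimmatStep (p, acc) x = ((x.length : Int), [x]) := by
        simp only [pisimmatStep, hL, if_pos h]
      rw [List.foldl_cons, step, ih, hxt, List.filter_cons]
      have h2 : ¬ pvMx t ((x.length : Int)) = p := by omega
      by_cases hc : pvMx t ((x.length : Int)) = (x.length : Int)
      · simp [hc]
        intro e; omega
      · simp [h2, if_neg hc]
        omega
    · have hm : max p ((x.length : Int)) = p := by omega
      have hxt : pvMx (x :: t) p = pvMx t p := by
        simp only [pvMx, List.foldl_cons, hL]; rw [hm]
      have step : pisimmatStep (p, acc) x = (p, acc ++ [x]) := by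
        simp only [pisimmatStep, hL, if_neg (by omega : ¬ p < (x.length : Int)), if_pos h]
      rw [List.foldl_cons, step, ih, hxt, List.filter_cons]
      by_cases hc : pvMx t p = p
      · simp [hc, ← h]
      · have hlt : p < pvMx t p := lt_of_le_of_ne (pvLe_mx t p) (Ne.symm hc)
        simp [hc, if_neg (by omega : ¬ ((x.length : Int)) = pvMx t p)]
    · have hm : max p ((x.length : Int)) = p := by omega
      have hxt : pvMx (x :: t) p = pvMx t p := by
        simp only [pvMx, List.foldl_cons, hL]; rw [hm]
      have step : pisimmatStep (p, acc) x = (p, acc) := by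
        simp only [pisimmatStep, hL, if_neg (by omega : ¬ p < (x.length : Int)),
          if_neg (by omega : ¬ p = (x.length : Int))]
      rw [List.foldl_cons, step, ih, hxt, List.filter_cons]
      have hge := pvLe_mx t p
      simp [if_neg (by omega : ¬ ((x.length : Int)) = pvMx t p)]

-- B's maximum with default 0 equals A's running maximum from 0
theorem pvMx_eq_alt (l : List String) :
    (PySem.List.max? (l.map (fun x => PySem.Str.len x)) (fun y => y)).getD 0 = pvMx l 0 := by
  cases l with
  | nil => simp [pvMx, PySem.List.max?]
  | cons x t =>
    rw [List.map_cons, PySem.List.max?_id_cons, Option.getD_some]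
    simp [pvMx, List.foldl_map]

-- ===== VERDICT (by name: the statement is the Claim_ definition above) =====
theorem pisimmat_spec : Claim_equal_pisimmat := by
  intro lista _
  show pisimmat lista = pisimmat_alt lista
  rw [pisimmat, pisimmat_loop, pisimmat_alt]
  simp only [pvMx_eq_alt]
  simp
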